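-- pv_equiv track=rewrite | github.com/srickb/Heart-Sound-Unsupervised-Model | Auto_Github/scripts/generate_daily_log.py | iter_priority_sections
-- ===== SOURCE A (Python) =====
-- from collections import OrderedDict
--
-- SECTION_PRIORITY = [
--     "Goal",
--     "Important context",
--     "Critical constraints",
--     "Required behavior",
--     "Segmentation rules",
--     "Signal preprocessing",
--     "Feature extraction",
--     "Feature groups",
--     "Model requirements",
--     "Training requirements",
--     "HDBSCAN requirements",
--     "Required analyses",
--     "Important constraints",
--     "Inputs to load",
--     "Output files to save",
--     "Outputs to save",
--     "The metadata file must include at least",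
--     "The cluster assignment file must include at least",
--     "The clustering summary must include at least",
--     "The training summary should include",
--     "The markdown report should summarize",
--     "Implementation guidance",
--     "Done when",
-- ]
--
-- def iter_priority_sections(sections: OrderedDict[str, list[str]]) -> list[tuple[str, list[str]]]:
--     ordered: list[tuple[str, list[str]]] = []
--     seen: set[str] = set()
--
--     for name in SECTION_PRIORITY:
--         if name in sections:
--             ordered.append((name, sections[name]))
--             seen.add(name)
--
--     for name, lines in sections.items():
--         if name not in seen:
--             ordered.append((name, lines))
--
--     return ordered
-- ===== SOURCE B (Python) =====
-- SECTION_PRIORITY = [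
--     "Goal",
--     "Important context",
--     "Critical constraints",
--     "Required behavior",
--     "Segmentation rules",
--     "Signal preprocessing",
--     "Feature extraction",
--     "Feature groups",
--     "Model requirements",
--     "Training requirements",
--     "HDBSCAN requirements",
--     "Required analyses",
--     "Important constraints",
--     "Inputs to load",
--     "Output files to save",
--     "Outputs to save",
--     "The metadata file must include at least",
--     "The cluster assignment file must include at least",
--     "The clustering summary must include at least",
--     "The training summary should include",
--     "The markdown report should summarize",
--     "Implementation guidance",
--     "Done when",
-- ]
--
-- def iter_priority_sections(sections):
--     P = len(SECTION_PRIORITY)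
--     buckets = {}
--     for name, lines in sections.items():
--         r = SECTION_PRIORITY.index(name) if name in SECTION_PRIORITY else P
--         buckets.setdefault(r, []).append((name, lines))
--     return [item for r in range(P + 1) for item in buckets.get(r, [])]
-- ===== Notes on version B (the rewrite author's own statement) =====
-- stated objective: alternative
-- what changed: A scans the priority list looking each name up in the dict and keeps a seen-set for a second remainder pass; B makes a single pass over the dict items distributing each into a bucket keyed by its priority rank (len(SECTION_PRIORITY) for non-priority names) and then concatenates the buckets in rank order.
import Mathlib
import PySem

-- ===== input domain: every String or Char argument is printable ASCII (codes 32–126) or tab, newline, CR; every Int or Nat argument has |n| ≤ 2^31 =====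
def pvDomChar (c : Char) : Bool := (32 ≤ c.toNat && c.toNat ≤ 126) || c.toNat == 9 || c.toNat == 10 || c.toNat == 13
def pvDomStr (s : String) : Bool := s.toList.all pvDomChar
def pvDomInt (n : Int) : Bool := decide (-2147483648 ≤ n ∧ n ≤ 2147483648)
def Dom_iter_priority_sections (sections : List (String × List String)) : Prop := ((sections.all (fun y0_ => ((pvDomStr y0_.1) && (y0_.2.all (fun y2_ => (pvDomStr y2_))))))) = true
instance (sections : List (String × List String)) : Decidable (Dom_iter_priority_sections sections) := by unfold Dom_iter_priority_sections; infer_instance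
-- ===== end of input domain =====

-- B reorders by a single bucket-distribution pass instead of A's priority scan + seen-set + remainder pass (alternative decomposition, same cost class).

def SECTION_PRIORITY : List String := [
  "Goal",
  "Important context",
  "Critical constraints",
  "Required behavior",
  "Segmentation rules",
  "Signal preprocessing",
  "Feature extraction",
  "Feature groups",
  "Model requirements",
  "Training requirements",
  "HDBSCAN requirements",
  "Required analyses",
  "Important constraints",
  "Inputs to load",
  "Output files to save",
  "Outputs to save",
  "The metadata file must include at least",
  "The cluster assignment file must include at least",
  "The clustering summary must include at least",
  "The training summary should include",
  "The markdown report should summarize",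
  "Implementation guidance",
  "Done when"]

-- ===== PORT A =====
-- 'if name in sections: ordered.append((name, sections[name])); seen.add(name)'
-- ported as a match on the dict's first-match lookup (membership and subscript agree on a dict).
def iter_priority_sections (sections : List (String × List String)) : List (String × List String) :=
  let st := SECTION_PRIORITY.foldl
    (fun (st : List (String × List String) × PySem.Set String) name =>
      match PySem.Dict.get? (PySem.Dict.mk sections) name with
      | some v => (st.1 ++ [(name, v)], PySem.Set.add st.2 name)
      | none => st)
    ([], PySem.Set.empty)
  sections.foldl
    (fun acc kv => if !(PySem.Set.contains st.2 kv.1) then acc ++ [kv] else acc)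
    st.1

-- ===== PORT B =====
-- 'SECTION_PRIORITY.index(name) if name in SECTION_PRIORITY else len(SECTION_PRIORITY)'
def pvRank (name : String) : Int :=
  match PySem.List.index? SECTION_PRIORITY name with
  | some k => (k : Int)
  | none => (SECTION_PRIORITY.length : Int)

def iter_priority_sections_alt (sections : List (String × List String)) : List (String × List String) :=
  let buckets : PySem.Dict Int (List (String × List String)) :=
    sections.foldl (fun d kv => PySem.Dict.modify d (pvRank kv.1) [] (· ++ [kv])) PySem.Dict.empty
  (PySem.List.pyRange 0 ((SECTION_PRIORITY.length : Int) + 1) 1).foldl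
    (fun acc r => acc ++ PySem.Dict.getD buckets r []) []

-- ===== PRECONDITION & SPEC =====
-- Pre_ excludes association lists with duplicate keys: a Python dict cannot contain
-- them, so such inputs do not correspond to any actual call of A.
def Pre_iter_priority_sections (sections : List (String × List String)) : Prop :=
  (sections.map Prod.fst).Nodup
instance (sections : List (String × List String)) : Decidable (Pre_iter_priority_sections sections) := by unfold Pre_iter_priority_sections; infer_instance

def pvWitness_iter_priority_sections : (List (String × List String)) :=
  [("Important context", ["b"]), ("extra", []), ("Goal", ["a"])]

def Spec_iter_priority_sections (sections : List (String × List String)) (out : List (String × List String)) : Prop := out = iter_priority_sections_alt sections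
instance (sections : List (String × List String)) (out : List (String × List String)) : Decidable (Spec_iter_priority_sections sections out) := by unfold Spec_iter_priority_sections; infer_instance

-- ===== CLAIM (what is proved, stated in full; the proofs are below) =====
def Claim_equal_iter_priority_sections : Prop := ∀ (sections : List (String × List String)), Dom_iter_priority_sections sections → Pre_iter_priority_sections sections → Spec_iter_priority_sections sections (iter_priority_sections sections)

-- ===== LEMMAS AND PROOFS =====

-- Both sides are shown equal to the canonical form
--   SECTION_PRIORITY.flatMap (fun p => sections.filter (·.1 == p))
--     ++ sections.filter (fun kv => !(SECTION_PRIORITY.contains kv.1)).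

theorem nodup_SP : SECTION_PRIORITY.Nodup := by decide

-- the first-match lookup, packaged as a sublist, equals the by-key filter when keys are unique
theorem getFilter (s : List (String × List String)) (h : (s.map Prod.fst).Nodup) (p : String) :
    ((PySem.Dict.get? (PySem.Dict.mk s) p).map (fun v => (p, v))).toList
      = s.filter (fun kv => kv.1 == p) := by
  induction s with
  | nil => simp [PySem.Dict.get?]
  | cons hd tl ih =>
    obtain ⟨k, v⟩ := hd
    simp only [List.map_cons, List.nodup_cons] at h
    rw [PySem.Dict.get?_mk_cons]
    by_cases hk : k = p
    · subst hk
      have : tl.filter (fun kv => kv.1 == k) = [] := by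
        rw [List.filter_eq_nil_iff]
        intro kv hkv hbeq
        exact h.1 (List.mem_map.mpr ⟨kv, hkv, (beq_iff_eq.mp hbeq)⟩)
      simp [this]
    · have hbeq : (k == p) = false := beq_eq_false_iff_ne.mpr hk
      simp [hbeq, ih h.2]

-- a member of the association list has a successful lookup
theorem mem_isSome (s : List (String × List String)) (kv : String × List String) (h : kv ∈ s) :
    (PySem.Dict.get? (PySem.Dict.mk s) kv.1).isSome = true := by
  induction s with
  | nil => simp at h
  | cons hd tl ih =>
    obtain ⟨k, v⟩ := hd
    rw [PySem.Dict.get?_mk_cons]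
    by_cases hk : (k == kv.1) = true
    · simp [hk]
    · simp only [hk, Bool.false_eq_true, if_false]
      rcases List.mem_cons.mp h with h1 | h1
      · exact absurd (beq_iff_eq.mpr (by rw [h1])) hk
      · exact ih h1

-- A's first loop, in closed form (pair of the ordered prefix and the seen-set loop)
theorem loopA (s : List (String × List String)) (l : List String)
    (acc : List (String × List String)) (seen : PySem.Set String) :
    (l.foldl
      (fun (st : List (String × List String) × PySem.Set String) name =>
        match PySem.Dict.get? (PySem.Dict.mk s) name with
        | some v => (st.1 ++ [(name, v)], PySem.Set.add st.2 name)
        | none => st)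
      (acc, seen))
    = (acc ++ l.flatMap (fun p => ((PySem.Dict.get? (PySem.Dict.mk s) p).map (fun v => (p, v))).toList),
       l.foldl (fun t name =>
          if (PySem.Dict.get? (PySem.Dict.mk s) name).isSome then PySem.Set.add t name else t) seen) := by
  induction l generalizing acc seen with
  | nil => simp
  | cons hd tl ih =>
    cases hget : PySem.Dict.get? (PySem.Dict.mk s) hd with
    | some v => simp [hget, ih]
    | none => simp [hget, ih]

-- membership in the seen-set built by the loop
theorem contains_loopA (s : List (String × List String)) (l : List String)
    (seen : PySem.Set String) (x : String) :
    (PySem.Set.contains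
        (l.foldl (fun t name =>
            if (PySem.Dict.get? (PySem.Dict.mk s) name).isSome then PySem.Set.add t name else t) seen)
        x = true)
      ↔ (PySem.Set.contains seen x = true
          ∨ (x ∈ l ∧ (PySem.Dict.get? (PySem.Dict.mk s) x).isSome = true)) := by
  induction l generalizing seen with
  | nil => simp
  | cons hd tl ih =>
    by_cases hp : (PySem.Dict.get? (PySem.Dict.mk s) hd).isSome = true
    · simp only [List.foldl_cons, hp, if_true]
      rw [ih]
      constructor
      · rintro (hc | hc)
        · have hm := (PySem.Set.contains_iff _ _).mp hc
          rcases (PySem.Set.mem_add _ _ _).mp hm with hm1 | hm1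
          · exact Or.inl ((PySem.Set.contains_iff _ _).mpr hm1)
          · subst hm1; exact Or.inr ⟨List.mem_cons_self, hp⟩
        · exact Or.inr ⟨List.mem_cons_of_mem _ hc.1, hc.2⟩
      · rintro (hc | ⟨hm, hs⟩)
        · exact Or.inl ((PySem.Set.contains_iff _ _).mpr
            ((PySem.Set.mem_add _ _ _).mpr (Or.inl ((PySem.Set.contains_iff _ _).mp hc))))
        · rcases List.mem_cons.mp hm with rfl | hm1
          · exact Or.inl ((PySem.Set.contains_iff _ _).mpr ((PySem.Set.mem_add _ _ _).mpr (Or.inr rfl)))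
          · exact Or.inr ⟨hm1, hs⟩
    · simp only [List.foldl_cons, hp]
      rw [ih]
      constructor
      · rintro (hc | hc)
        · exact Or.inl hc
        · exact Or.inr ⟨List.mem_cons_of_mem _ hc.1, hc.2⟩
      · rintro (hc | ⟨hm, hs⟩)
        · exact Or.inl hc
        · rcases List.mem_cons.mp hm with rfl | hm1
          · exact absurd hs hp
          · exact Or.inr ⟨hm1, hs⟩

-- A equals the canonical form
theorem A_eq_canon (s : List (String × List String)) (h : (s.map Prod.fst).Nodup) :
    iter_priority_sections s
      = SECTION_PRIORITY.flatMap (fun p => s.filter (fun kv => kv.1 == p))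
          ++ s.filter (fun kv => !(SECTION_PRIORITY.contains kv.1)) := by
  unfold iter_priority_sections
  rw [loopA]
  simp only
  rw [PySem.List.foldl_append_if_eq_filter]
  congr 1
  · rw [List.nil_append]
    apply List.flatMap_congr
    intro p _
    exact getFilter s h p
  · apply List.filter_congr
    intro kv hkv
    have hsome := mem_isSome s kv hkv
    have hcc : PySem.Set.contains
        (SECTION_PRIORITY.foldl (fun t name =>
          if (PySem.Dict.get? (PySem.Dict.mk s) name).isSome then PySem.Set.add t name else t)
          PySem.Set.empty) kv.1 = SECTION_PRIORITY.contains kv.1 := by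
      rw [Bool.eq_iff_iff, contains_loopA, List.contains_iff_mem]
      constructor
      · rintro (hc | hc)
        · exact absurd ((PySem.Set.contains_iff _ _).mp hc) (by simp [PySem.Set.empty])
        · exact hc.1
      · intro hc
        exact Or.inr ⟨hc, hsome⟩
    rw [hcc]

-- pvRank characterisation
theorem pvRank_eq_len_iff (n : String) :
    pvRank n = (SECTION_PRIORITY.length : Int) ↔ n ∉ SECTION_PRIORITY := by
  unfold pvRank
  cases hidx : PySem.List.index? SECTION_PRIORITY n with
  | none => exact iff_of_true rfl ((PySem.List.index?_eq_none_iff _ _).mp hidx)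
  | some k =>
    obtain ⟨hk, hget, -⟩ := PySem.List.getElem_of_index?_eq_some hidx
    have hmem : n ∈ SECTION_PRIORITY := by rw [← hget]; exact List.getElem_mem hk
    exact iff_of_false
      (fun hkk => absurd
        (by
          have h2 : (k : Int) = (SECTION_PRIORITY.length : Int) := hkk
          exact_mod_cast h2 : k = SECTION_PRIORITY.length)
        (Nat.ne_of_lt hk))
      (fun hn => hn hmem)

theorem pvRank_eq_iff (n : String) (i : Nat) (hi : i < SECTION_PRIORITY.length) :
    pvRank n = (i : Int) ↔ n = SECTION_PRIORITY.getD i "" := by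
  unfold pvRank
  cases hidx : PySem.List.index? SECTION_PRIORITY n with
  | none =>
    have hnm := (PySem.List.index?_eq_none_iff _ _).mp hidx
    refine iff_of_false (fun hh => ?_) (fun hh => ?_)
    · have h2 : (SECTION_PRIORITY.length : Int) = (i : Int) := hh
      have hli : SECTION_PRIORITY.length = i := by exact_mod_cast h2
      omega
    · exact hnm (by rw [hh, List.getD_eq_getElem _ _ hi]; exact List.getElem_mem hi)
  | some k =>
    obtain ⟨hk, hget, -⟩ := PySem.List.getElem_of_index?_eq_some hidx
    constructor
    · intro hh
      have h2 : (k : Int) = (i : Int) := hh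
      have hki : k = i := by exact_mod_cast h2
      subst hki
      rw [List.getD_eq_getElem _ _ hk, ← hget]
    · intro hh
      have hgg : SECTION_PRIORITY[k]'hk = SECTION_PRIORITY[i]'hi := by
        rw [hget, hh, List.getD_eq_getElem _ _ hi]
      have hki : k = i := (nodup_SP.getElem_inj_iff).mp hgg
      show (k : Int) = (i : Int)
      exact_mod_cast hki

-- flatMap over the index range equals flatMap over the list
theorem flatMap_range_getD {α β : Type} (l : List α) (d : α) (F : α → List β) :
    (List.range l.length).flatMap (fun i => F (l.getD i d)) = l.flatMap F := by
  induction l with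
  | nil => simp
  | cons hd tl ih =>
    rw [List.length_cons, List.range_succ_eq_map, List.flatMap_cons, List.flatMap_map]
    simp only [List.getD_cons_zero, List.getD_cons_succ]
    rw [List.flatMap_cons]
    exact congrArg (fun t => F hd ++ t) ih

-- B equals the canonical form
theorem B_eq_canon (s : List (String × List String)) :
    iter_priority_sections_alt s
      = SECTION_PRIORITY.flatMap (fun p => s.filter (fun kv => kv.1 == p))
          ++ s.filter (fun kv => !(SECTION_PRIORITY.contains kv.1)) := by
  unfold iter_priority_sections_alt
  simp only
  rw [PySem.List.foldl_append_eq_flatMap, List.nil_append]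
  have hbuckets : ∀ r : Int,
      PySem.Dict.getD
        (s.foldl (fun d kv => PySem.Dict.modify d (pvRank kv.1) [] (· ++ [kv])) PySem.Dict.empty) r []
      = s.filter (fun kv => pvRank kv.1 == r) := by
    intro r
    have hfold : (s.foldl (fun d kv => PySem.Dict.modify d (pvRank kv.1) [] (· ++ [kv])) PySem.Dict.empty)
        = ((s.map (fun kv => (pvRank kv.1, kv))).foldl
            (fun d p => PySem.Dict.modify d p.1 [] (· ++ [p.2])) PySem.Dict.empty) :=
      (List.foldl_map (f := fun kv => (pvRank kv.1, kv))
        (g := fun d p => PySem.Dict.modify d p.1 [] (· ++ [p.2]))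
        (l := s) (init := PySem.Dict.empty)).symm
    rw [hfold, PySem.Dict.getD_foldl_modify_append, List.filter_map]
    simp [Function.comp_def]
  have hrange : PySem.List.pyRange 0 ((SECTION_PRIORITY.length : Int) + 1) 1
      = (List.range SECTION_PRIORITY.length).map (fun n => Int.ofNat n)
          ++ [(SECTION_PRIORITY.length : Int)] := by decide
  rw [hrange]
  simp only [hbuckets]
  rw [List.flatMap_append, List.flatMap_map, List.flatMap_cons, List.flatMap_nil, List.append_nil]
  congr 1
  · rw [← flatMap_range_getD SECTION_PRIORITY "" (fun p => s.filter (fun kv => kv.1 == p))]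
    apply List.flatMap_congr
    intro i hi
    have hilt : i < SECTION_PRIORITY.length := List.mem_range.mp hi
    apply List.filter_congr
    intro kv _
    cases hcase : decide (pvRank kv.1 = (i : Int)) with
    | false =>
      have hne : ¬ pvRank kv.1 = (i : Int) := of_decide_eq_false hcase
      have hne2 : ¬ kv.1 = SECTION_PRIORITY.getD i "" := fun hh =>
        hne ((pvRank_eq_iff kv.1 i hilt).mpr hh)
      rw [List.getD_eq_getElem?_getD] at hne2
      simp [beq_eq_false_iff_ne.mpr hne, hne2]
    | true =>
      have heq : pvRank kv.1 = (i : Int) := of_decide_eq_true hcase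
      have heq2 : kv.1 = SECTION_PRIORITY.getD i "" := (pvRank_eq_iff kv.1 i hilt).mp heq
      rw [List.getD_eq_getElem?_getD] at heq2
      rw [heq2] at heq
      simp [heq, heq2]
  · apply List.filter_congr
    intro kv _
    cases hcase : decide (kv.1 ∈ SECTION_PRIORITY) with
    | false =>
      have hnm : kv.1 ∉ SECTION_PRIORITY := of_decide_eq_false hcase
      have hrk : pvRank kv.1 = (SECTION_PRIORITY.length : Int) := (pvRank_eq_len_iff kv.1).mpr hnm
      simp [beq_iff_eq.mpr hrk, hnm]
    | true =>
      have hm : kv.1 ∈ SECTION_PRIORITY := of_decide_eq_true hcase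
      have hne : ¬ pvRank kv.1 = (SECTION_PRIORITY.length : Int) := fun hh =>
        (pvRank_eq_len_iff kv.1).mp hh hm
      simp [beq_eq_false_iff_ne.mpr hne, hm]

theorem iter_priority_sections_equal :
    ∀ (sections : List (String × List String)),
      Pre_iter_priority_sections sections →
      iter_priority_sections sections = iter_priority_sections_alt sections := by
  intro s hpre
  rw [A_eq_canon s hpre, B_eq_canon s]

-- ===== VERDICT (by name: the statement is the Claim_ definition above) =====
theorem iter_priority_sections_spec : Claim_equal_iter_priority_sections := by
  intro s _ hpre
  exact iter_priority_sections_equal s hpre
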